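-- pv_equiv track=rewrite | github.com/jamesvgibbs/EditAlly | editally.py | analyze_chapter
-- ===== SOURCE A (Python) =====
-- def analyze_chapter(chapter):
--     sentences = chapter.split('.')
--     num_sentences = len(sentences)
--     dialogues = [sentence for sentence in sentences if '"' in sentence]
--     num_dialogues = len(dialogues)
--
--     # Placeholder for more advanced analysis
--     # This could be expanded with more sophisticated NLP techniques
--
--     return {
--         "num_sentences": num_sentences,
--         "num_dialogues": num_dialogues
--     }
-- ===== SOURCE B (Python) =====
-- def analyze_chapter(chapter):
--     num_sentences = chapter.count('.') + 1
--     num_dialogues = 0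
--     seen_quote = False
--     for ch in chapter:
--         if ch == '.':
--             if seen_quote:
--                 num_dialogues += 1
--             seen_quote = False
--         elif ch == '"':
--             seen_quote = True
--     if seen_quote:
--         num_dialogues += 1
--     return {
--         "num_sentences": num_sentences,
--         "num_dialogues": num_dialogues
--     }
-- ===== Notes on version B (the rewrite author's own statement) =====
-- stated objective: alternative
-- what changed: Replaces building the split list and a comprehension over it by a closed form (period count plus one) for sentences and a single character pass with a seen-quote flag for dialogues; it allocates no intermediate lists, though CPython's C-level split makes A faster in practice.
import Mathlib
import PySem

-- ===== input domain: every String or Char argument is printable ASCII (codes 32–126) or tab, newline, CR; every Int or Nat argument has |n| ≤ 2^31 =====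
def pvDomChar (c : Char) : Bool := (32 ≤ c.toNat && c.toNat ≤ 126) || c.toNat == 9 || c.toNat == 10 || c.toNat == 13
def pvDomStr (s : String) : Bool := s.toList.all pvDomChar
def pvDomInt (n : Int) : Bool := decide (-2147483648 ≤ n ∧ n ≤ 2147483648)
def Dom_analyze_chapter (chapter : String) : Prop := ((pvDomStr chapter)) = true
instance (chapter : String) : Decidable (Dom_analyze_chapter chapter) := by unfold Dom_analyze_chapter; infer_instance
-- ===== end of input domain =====

-- B replaces A's split-list and comprehension by a closed-form period count and one flagged pass over the characters (objective: alternative — no intermediate lists).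

-- ===== PORT A =====
def analyze_chapter (chapter : String) : List (String × Int) :=
  let sentences := PySem.Chars.splitOn chapter.toList ['.']
  let num_sentences : Int := sentences.length
  let dialogues := sentences.filter (fun s => PySem.Chars.isIn ['"'] s)
  let num_dialogues : Int := dialogues.length
  [("num_sentences", num_sentences), ("num_dialogues", num_dialogues)]

-- ===== PORT B =====
def analyze_chapter_alt (chapter : String) : List (String × Int) :=
  let num_sentences : Int := (PySem.Str.count chapter "." : Int) + 1
  let r := chapter.toList.foldl
    (fun (p : Int × Bool) c =>
      if c = '.' then (p.1 + (if p.2 then 1 else 0), false)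
      else if c = '"' then (p.1, true)
      else p) (0, false)
  let num_dialogues : Int := r.1 + (if r.2 then 1 else 0)
  [("num_sentences", num_sentences), ("num_dialogues", num_dialogues)]

-- ===== PRECONDITION & SPEC =====
def Spec_analyze_chapter (chapter : String) (out : List (String × Int)) : Prop := out = analyze_chapter_alt chapter
instance (chapter : String) (out : List (String × Int)) : Decidable (Spec_analyze_chapter chapter out) := by unfold Spec_analyze_chapter; infer_instance

-- ===== CLAIM (what is proved, stated in full; the proofs are below) =====
def Claim_equal_analyze_chapter : Prop := ∀ (chapter : String), Dom_analyze_chapter chapter → Spec_analyze_chapter chapter (analyze_chapter chapter)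

-- ===== LEMMAS AND PROOFS =====

-- simple structural form of splitting on a single '.'
def splitDot : List Char → List Char → List (List Char)
  | [], cur => [cur.reverse]
  | c :: rest, cur =>
    if c = '.' then cur.reverse :: splitDot rest [] else splitDot rest (c :: cur)

theorem splitOn_go_eq (l : List Char) : ∀ (fuel : Nat), l.length ≤ fuel →
    ∀ (cur : List Char) (acc : List (List Char)),
    PySem.Chars.splitOn.go ['.'] fuel l cur acc = acc.reverse ++ splitDot l cur := by
  induction l with
  | nil =>
    intro fuel _ cur acc
    cases fuel <;> simp [PySem.Chars.splitOn.go, splitDot]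
  | cons c rest ih =>
    intro fuel hf cur acc
    cases fuel with
    | zero => simp at hf
    | succ f =>
      have hf' : rest.length ≤ f := by simpa using hf
      by_cases hc : c = '.'
      · subst hc
        rw [show PySem.Chars.splitOn.go ['.'] (f+1) ('.' :: rest) cur acc
            = PySem.Chars.splitOn.go ['.'] f rest [] (cur.reverse :: acc) by
          simp [PySem.Chars.splitOn.go, List.isPrefixOf]]
        rw [ih f hf', splitDot]
        simp
      · rw [show PySem.Chars.splitOn.go ['.'] (f+1) (c :: rest) cur acc
            = PySem.Chars.splitOn.go ['.'] f rest (c :: cur) acc by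
          simp [PySem.Chars.splitOn.go, List.isPrefixOf, Ne.symm hc]]
        rw [ih f hf', splitDot]
        simp [hc]

theorem splitOn_eq_splitDot (cs : List Char) :
    PySem.Chars.splitOn cs ['.'] = splitDot cs [] := by
  unfold PySem.Chars.splitOn
  rw [splitOn_go_eq cs (cs.length + 1) (by omega) [] []]
  simp

theorem count_go_eq (l : List Char) : ∀ (fuel : Nat), l.length ≤ fuel → ∀ (acc : Nat),
    PySem.Chars.count.go ['.'] fuel l acc = acc + l.count '.' := by
  induction l with
  | nil => intro fuel _ acc; cases fuel <;> simp [PySem.Chars.count.go]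
  | cons c rest ih =>
    intro fuel hf acc
    cases fuel with
    | zero => simp at hf
    | succ f =>
      have hf' : rest.length ≤ f := by simpa using hf
      by_cases hc : c = '.'
      · subst hc
        rw [show PySem.Chars.count.go ['.'] (f+1) ('.' :: rest) acc
            = PySem.Chars.count.go ['.'] f rest (acc + 1) by
          simp [PySem.Chars.count.go, List.isPrefixOf]]
        rw [ih f hf']
        simp; omega
      · rw [show PySem.Chars.count.go ['.'] (f+1) (c :: rest) acc
            = PySem.Chars.count.go ['.'] f rest acc by
          simp [PySem.Chars.count.go, List.isPrefixOf, Ne.symm hc]]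
        rw [ih f hf']
        simp [hc]

theorem chars_count_dot (cs : List Char) :
    PySem.Chars.count cs ['.'] = cs.count '.' := by
  unfold PySem.Chars.count
  simp [count_go_eq cs cs.length le_rfl 0]

theorem length_splitDot (cs : List Char) : ∀ cur,
    (splitDot cs cur).length = cs.count '.' + 1 := by
  induction cs with
  | nil => intro cur; simp [splitDot]
  | cons c rest ih =>
    intro cur
    by_cases hc : c = '.'
    · subst hc; simp [splitDot, ih]
    · simp [splitDot, hc, ih]

theorem singleton_infix_iff (a : Char) (l : List Char) : [a] <:+: l ↔ a ∈ l := by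
  constructor
  · intro h; exact (List.singleton_sublist).1 h.sublist
  · intro h
    obtain ⟨s, t, rfl⟩ := List.append_of_mem h
    exact ⟨s, t, by simp⟩

theorem isIn_quote (s : List Char) :
    PySem.Chars.isIn ['"'] s = s.contains '"' := by
  by_cases h : '"' ∈ s
  · rw [(PySem.Chars.isIn_iff_infix _ _).2 ((singleton_infix_iff _ _).2 h)]
    simp [h]
  · rw [(PySem.Chars.isIn_eq_false_iff _ _).2 (fun hi => h ((singleton_infix_iff _ _).1 hi))]
    simp [h]

-- the one-pass fold counts exactly the splitDot segments containing a quote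
def dstep (p : Int × Bool) (c : Char) : Int × Bool :=
  if c = '.' then (p.1 + (if p.2 then 1 else 0), false)
  else if c = '"' then (p.1, true)
  else p

theorem fold_invariant (cs : List Char) : ∀ (d : Int) (seen : Bool) (cur : List Char),
    seen = cur.contains '"' →
    (cs.foldl dstep (d, seen)).1 + (if (cs.foldl dstep (d, seen)).2 then 1 else 0)
    = d + ((splitDot cs cur).countP (fun s => s.contains '"') : Int) := by
  induction cs with
  | nil =>
    intro d seen cur hs
    simp only [List.foldl_nil, splitDot, List.countP_cons, List.countP_nil, hs]
    by_cases h : '"' ∈ cur <;> simp [h]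
  | cons c rest ih =>
    intro d seen cur hs
    by_cases hc : c = '.'
    · subst hc
      rw [List.foldl_cons, show dstep (d, seen) '.' = (d + (if seen then 1 else 0), false) from rfl]
      rw [ih (d + (if seen then 1 else 0)) false [] (by simp)]
      simp only [splitDot, hs]
      by_cases h : '"' ∈ cur <;> simp [h] <;> try ring
    · by_cases hq : c = '"'
      · subst hq
        rw [List.foldl_cons, show dstep (d, seen) '"' = (d, true) from rfl]
        rw [ih d true ('"' :: cur) (by simp)]
        simp [splitDot]
      · rw [List.foldl_cons, show dstep (d, seen) c = (d, seen) by simp [dstep, hc, hq]]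
        rw [ih d seen (c :: cur) (by simp [Ne.symm hq, hs])]
        simp [splitDot, hc]

-- ===== VERDICT (by name: the statement is the Claim_ definition above) =====
theorem analyze_chapter_spec : Claim_equal_analyze_chapter := by
  intro chapter _
  unfold Spec_analyze_chapter analyze_chapter analyze_chapter_alt
  simp only [PySem.Str.count_eq]
  rw [show (".".toList) = ['.'] from rfl, splitOn_eq_splitDot, chars_count_dot]
  simp only [show (fun (p : Int × Bool) c =>
      if c = '.' then (p.1 + (if p.2 then 1 else 0), false)
      else if c = '"' then (p.1, true)
      else p) = dstep from rfl]
  have hlen := length_splitDot chapter.toList []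
  have hfold := fold_invariant chapter.toList 0 false [] (by simp)
  have hfilter : (List.filter (fun s => PySem.Chars.isIn ['"'] s) (splitDot chapter.toList [])).length
      = (splitDot chapter.toList []).countP (fun s => s.contains '"') := by
    rw [← List.countP_eq_length_filter]
    apply List.countP_congr; intro s _; simp [isIn_quote]
  simp only [hlen, hfilter]
  rw [List.cons_eq_cons, Prod.mk.injEq, List.cons_eq_cons, Prod.mk.injEq]
  refine ⟨⟨rfl, by push_cast; ring⟩, ⟨rfl, by omega⟩, rfl⟩
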